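-- pv_equiv track=rewrite | github.com/CMikhi/AeroStream | CLI/tui.py | apply_ocean_effect
-- ===== SOURCE A (Python) =====
-- class Colors:
--     """ANSI color codes for terminal output"""
--     # Standard colors
--     BLACK = '\033[30m'
--     RED = '\033[31m'
--     GREEN = '\033[32m'
--     YELLOW = '\033[33m'
--     BLUE = '\033[34m'
--     MAGENTA = '\033[35m'
--     CYAN = '\033[36m'
--     WHITE = '\033[37m'
--
--     # Bright colors
--     BRIGHT_BLACK = '\033[90m'
--     BRIGHT_RED = '\033[91m'
--     BRIGHT_GREEN = '\033[92m'
--     BRIGHT_YELLOW = '\033[93m'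
--     BRIGHT_BLUE = '\033[94m'
--     BRIGHT_MAGENTA = '\033[95m'
--     BRIGHT_CYAN = '\033[96m'
--     BRIGHT_WHITE = '\033[97m'
--
--     # Reset
--     RESET = '\033[0m'
--
-- def apply_ocean_effect(text: str, line_num: int) -> str:
--     """Apply ocean color effect (blue to cyan gradient)"""
--     ocean_colors = [Colors.BLUE, Colors.BRIGHT_BLUE, Colors.CYAN, Colors.BRIGHT_CYAN]
--     color = ocean_colors[line_num % len(ocean_colors)]
--
--     colored_text = ""
--     for char in text:
--         if char != ' ':
--             colored_text += color + char
--         else: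
--             colored_text += char
--
--     return colored_text + Colors.RESET
-- ===== SOURCE B (Python) =====
-- def apply_ocean_effect(text: str, line_num: int) -> str:
--     """Ocean gradient via split/join: split on spaces, color each word's chars by joining
--     with the color as separator (leading '' puts a color before the first char too),
--     then rejoin the words with spaces."""
--     ocean_colors = ['\033[34m', '\033[94m', '\033[36m', '\033[96m']
--     color = ocean_colors[line_num % 4]
--     words = text.split(' ')
--     return ' '.join(color.join([''] + list(w)) for w in words) + '\033[0m'
-- ===== Notes on version B (the rewrite author's own statement) =====
-- stated objective: faster
-- what changed: Replaces A's per-character loop of repeated string concatenation by a staged split/join pipeline: split the text on spaces, color each word by joining its characters with the color code as separator (leading empty piece so the first char is colored too), and rejoin the words with spaces; bulk str.join avoids A's incremental concatenation.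
import Mathlib
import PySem

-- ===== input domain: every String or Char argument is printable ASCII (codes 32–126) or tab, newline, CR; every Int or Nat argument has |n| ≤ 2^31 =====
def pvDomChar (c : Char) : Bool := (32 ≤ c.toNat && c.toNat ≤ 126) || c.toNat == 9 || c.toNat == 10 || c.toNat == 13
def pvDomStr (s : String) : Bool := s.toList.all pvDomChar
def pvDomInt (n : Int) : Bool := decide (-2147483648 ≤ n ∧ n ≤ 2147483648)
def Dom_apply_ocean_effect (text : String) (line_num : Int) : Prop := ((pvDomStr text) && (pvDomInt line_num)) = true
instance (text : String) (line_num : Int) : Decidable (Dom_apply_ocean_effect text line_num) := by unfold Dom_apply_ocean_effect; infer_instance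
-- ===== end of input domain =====

-- B replaces A's per-character accumulator loop with a split-on-space / join pipeline ('alternative'); return values proved equal.

-- ===== PORT A =====
def oceanColors : List String := ["\x1b[34m", "\x1b[94m", "\x1b[36m", "\x1b[96m"]

def colorReset : String := "\x1b[0m"

-- literal transliteration of A: index ocean_colors[line_num % 4], then loop over chars accumulating
def apply_ocean_effect (text : String) (line_num : Int) : String :=
  let color := (PySem.List.pyGet? oceanColors (PySem.Int.mod line_num (Int.ofNat oceanColors.length))).getD ""
  let colored := text.toList.foldl
    (fun acc c => if c != ' ' then acc ++ color.toList ++ [c] else acc ++ [c]) []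
  String.ofList (colored ++ colorReset.toList)

-- ===== PORT B =====
-- transliteration of Source B: text.split(' ') → Chars.splitOn; color.join([''] + list(w)) →
-- Chars.join color ([[]] ++ w.map ([·])); ' '.join(...) → Chars.join [' '].
def apply_ocean_effect_alt (text : String) (line_num : Int) : String :=
  let color := (PySem.List.pyGet? oceanColors (PySem.Int.mod line_num 4)).getD ""
  let words := PySem.Chars.splitOn text.toList [' ']
  String.ofList
    (PySem.Chars.join [' ']
      (words.map (fun w => PySem.Chars.join color.toList ([[]] ++ w.map (fun c => [c]))))
     ++ colorReset.toList)

-- ===== PRECONDITION & SPEC =====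
def Spec_apply_ocean_effect (text : String) (line_num : Int) (out : String) : Prop := out = apply_ocean_effect_alt text line_num
instance (text : String) (line_num : Int) (out : String) : Decidable (Spec_apply_ocean_effect text line_num out) := by unfold Spec_apply_ocean_effect; infer_instance

-- ===== CLAIM (what is proved, stated in full; the proofs are below) =====
def Claim_equal_apply_ocean_effect : Prop := ∀ (text : String) (line_num : Int), Dom_apply_ocean_effect text line_num → Spec_apply_ocean_effect text line_num (apply_ocean_effect text line_num)

-- ===== LEMMAS AND PROOFS =====

-- A's foldl accumulator loop computes the flatMap of the per-char choice
theorem ocean_foldl_eq_flatMap (col : List Char) (l acc : List Char) :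
    l.foldl (fun acc c => if c != ' ' then acc ++ col ++ [c] else acc ++ [c]) acc
      = acc ++ l.flatMap (fun c => if c = ' ' then [c] else col ++ [c]) := by
  induction l generalizing acc with
  | nil => simp
  | cons c t ih =>
    rw [List.foldl_cons, ih]
    by_cases h : c = ' ' <;> simp [h, List.append_assoc]

-- reference splitter: splitOn cs [' '] with an explicit reversed current-piece accumulator
def pvSplitSp : List Char → List Char → List (List Char)
  | [], cur => [cur.reverse]
  | c :: rest, cur => if c = ' ' then cur.reverse :: pvSplitSp rest [] else pvSplitSp rest (c :: cur)

theorem pvSplitSp_ne_nil (l cur : List Char) : pvSplitSp l cur ≠ [] := by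
  induction l generalizing cur with
  | nil => simp [pvSplitSp]
  | cons c rest ih =>
    by_cases h : c = ' ' <;> simp [pvSplitSp, h, ih]

theorem splitOn_go_eq (fuel : Nat) (l cur : List Char) (acc : List (List Char))
    (h : l.length < fuel) :
    PySem.Chars.splitOn.go [' '] fuel l cur acc = acc.reverse ++ pvSplitSp l cur := by
  induction fuel generalizing l cur acc with
  | zero => omega
  | succ fuel ih =>
    cases l with
    | nil =>
      rw [PySem.Chars.splitOn.go]
      · simp [pvSplitSp]
      · omega
    | cons c rest =>
      rw [PySem.Chars.splitOn.go]
      by_cases hc : c = ' '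
      · have hp : List.isPrefixOf [' '] (c :: rest) = true := by
          simp [List.isPrefixOf, hc]
        rw [if_pos hp, ih]
        · simp [pvSplitSp, hc]
        · simp at h ⊢; omega
      · have hp : List.isPrefixOf [' '] (c :: rest) = false := by
          simp [List.isPrefixOf]; exact fun e => hc e.symm
        rw [if_neg (by simp [hp]), ih]
        · simp [pvSplitSp, hc]
        · simp at h; omega

theorem splitOn_eq_pvSplitSp (cs : List Char) :
    PySem.Chars.splitOn cs [' '] = pvSplitSp cs [] := by
  rw [PySem.Chars.splitOn, splitOn_go_eq cs.length.succ cs [] [] (by omega)]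
  simp

-- color.join([''] + list(w)) puts col before every char of w
theorem join_head (col x t : List Char) :
    PySem.Chars.join col (x :: t.map (fun c => [c])) = x ++ t.flatMap (fun c => col ++ [c]) := by
  induction t generalizing x with
  | nil => simp [PySem.Chars.join, List.intercalate]
  | cons d t' ih =>
    rw [List.map_cons, PySem.Chars.join_cons_cons, ih]
    simp [List.append_assoc]

theorem join_word_eq_flatMap (col w : List Char) :
    PySem.Chars.join col ([[]] ++ w.map (fun c => [c])) = w.flatMap (fun c => col ++ [c]) := by
  simpa using join_head col [] w

-- rejoin-with-spaces of the colorized words reconstructs the per-char flatMap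
theorem join_splitsp (col : List Char) (cs cur : List Char) :
    PySem.Chars.join [' ']
        ((pvSplitSp cs cur).map (fun w => w.flatMap (fun c => col ++ [c])))
      = cur.reverse.flatMap (fun c => col ++ [c])
        ++ cs.flatMap (fun c => if c = ' ' then [c] else col ++ [c]) := by
  induction cs generalizing cur with
  | nil => simp [pvSplitSp, PySem.Chars.join, List.intercalate]
  | cons c rest ih =>
    by_cases hc : c = ' '
    · have hne : (pvSplitSp rest []).map (fun w => w.flatMap (fun c => col ++ [c])) ≠ [] := by
        simp [pvSplitSp_ne_nil]
      obtain ⟨x, l', hx⟩ := List.exists_cons_of_ne_nil hne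
      simp only [pvSplitSp, hc, if_pos, List.map_cons, hx]
      rw [PySem.Chars.join_cons_cons, ← hx, ih]
      simp [List.append_assoc]
    · simp only [pvSplitSp, hc, ite_false]
      rw [ih]
      simp [hc, List.append_assoc]

-- ===== VERDICT (by name: the statement is the Claim_ definition above) =====
theorem apply_ocean_effect_spec : Claim_equal_apply_ocean_effect := by
  intro text line_num _
  unfold Spec_apply_ocean_effect apply_ocean_effect apply_ocean_effect_alt
  simp only [oceanColors, List.length_cons, List.length_nil]
  rw [ocean_foldl_eq_flatMap, splitOn_eq_pvSplitSp,
      List.map_congr_left (fun w _ => join_word_eq_flatMap _ w), join_splitsp]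
  norm_num
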